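-- pv_equiv track=rewrite | github.com/sinik111/D2D_Game | EngineBreakers/Resource/update_anim_sprite_paths.py | _find_first_object_end
-- ===== SOURCE A (Python) =====
-- def _find_first_object_end(text: str) -> int:
--     """Return index just after the first complete top-level JSON object, or -1 if not found."""
--     depth = 0
--     in_str = False
--     esc = False
--     started = False
--
--     for i, ch in enumerate(text):
--         if in_str:
--             if esc:
--                 esc = False
--             elif ch == '\\':
--                 esc = True
--             elif ch == '"':
--                 in_str = False
--             continue
--
--         # not in string
--         if ch == '"':
--             in_str = True
--         elif ch == '{':
--             depth += 1
--             started = True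
--         elif ch == '}':
--             if depth > 0:
--                 depth -= 1
--                 if depth == 0 and started:
--                     return i + 1
--         # ignore other chars
--     return -1
-- ===== SOURCE B (Python) =====
-- def _find_first_object_end(text: str) -> int:
--     """Return index just after the first complete top-level JSON object, or -1 if not found."""
--     n = len(text)
--     i = 0
--     depth = 0
--     while i < n:
--         ch = text[i]
--         if ch == '"':
--             # skip the whole string literal, handling backslash escapes
--             i += 1
--             while i < n:
--                 if text[i] == '\\':
--                     i += 2
--                 elif text[i] == '"':
--                     i += 1
--                     break
--                 else:
--                     i += 1
--             continue
--         if ch == '{':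
--             depth += 1
--         elif ch == '}' and depth > 0:
--             depth -= 1
--             if depth == 0:
--                 return i + 1
--         i += 1
--     return -1
-- ===== Notes on version B (the rewrite author's own statement) =====
-- stated objective: alternative
-- what changed: Replaces the flag-state machine (in_str/esc/started booleans updated every character) by an index-driven while loop whose inner helper loop skips a whole string literal (consuming escapes two characters at a time), so the outer loop carries only the depth counter.
import Mathlib
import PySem

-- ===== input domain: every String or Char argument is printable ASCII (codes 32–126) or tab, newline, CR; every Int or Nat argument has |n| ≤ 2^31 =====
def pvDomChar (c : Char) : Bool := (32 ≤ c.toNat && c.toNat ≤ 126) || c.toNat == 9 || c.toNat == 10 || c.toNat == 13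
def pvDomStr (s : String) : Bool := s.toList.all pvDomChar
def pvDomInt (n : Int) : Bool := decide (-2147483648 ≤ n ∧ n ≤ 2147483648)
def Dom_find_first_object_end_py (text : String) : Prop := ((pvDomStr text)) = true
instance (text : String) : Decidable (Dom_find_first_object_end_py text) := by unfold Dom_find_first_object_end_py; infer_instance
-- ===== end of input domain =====

-- B replaces A's in_str/esc/started flag machine by an index-driven loop with an
-- inner string-skipping helper; same values on every input (alternative decomposition).

-- ===== PORT A =====
-- A's for-loop over enumerate(text) with state (depth, in_str, esc, started).
def pvGoA : List Char → Nat → Int → Bool → Bool → Bool → Int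
  | [], _, _, _, _, _ => -1
  | ch :: rest, i, depth, in_str, esc, started =>
    if in_str then
      if esc then pvGoA rest (i+1) depth true false started
      else if ch = '\\' then pvGoA rest (i+1) depth true true started
      else if ch = '"' then pvGoA rest (i+1) depth false false started
      else pvGoA rest (i+1) depth true false started
    else
      if ch = '"' then pvGoA rest (i+1) depth true false started
      else if ch = '{' then pvGoA rest (i+1) (depth + 1) false false true
      else if ch = '}' then
        if depth > 0 then
          if depth - 1 = 0 ∧ started then ((i : Int) + 1)
          else pvGoA rest (i+1) (depth - 1) false false started
        else pvGoA rest (i+1) depth false false started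
      else pvGoA rest (i+1) depth false false started

def find_first_object_end_py (text : String) : Int :=
  pvGoA text.toList 0 0 false false false

-- ===== PORT B =====
-- inner while loop: skip a string literal; returns the rest of the text and the index just past it.
def pvSkipStr : List Char → Nat → List Char × Nat
  | [], i => ([], i)
  | c :: rest, i =>
    if c = '\\' then
      match rest with
      | [] => ([], i + 2)
      | _ :: r2 => pvSkipStr r2 (i + 2)
    else if c = '"' then (rest, i + 1)
    else pvSkipStr rest (i + 1)

theorem pvSkipStr_len_aux : ∀ (n : Nat) (l : List Char) (i : Nat), l.length ≤ n →
    (pvSkipStr l i).1.length ≤ l.length := by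
  intro n
  induction n with
  | zero =>
      intro l i hl
      have : l = [] := List.eq_nil_of_length_eq_zero (Nat.le_zero.mp hl)
      subst this; simp [pvSkipStr]
  | succ m ih =>
      intro l i hl
      cases l with
      | nil => simp [pvSkipStr]
      | cons c rest =>
        by_cases hb : c = '\\'
        · subst hb
          cases rest with
          | nil => simp [pvSkipStr]
          | cons x r2 =>
              simp only [pvSkipStr]
              have h2 : r2.length ≤ m := by simp at hl; omega
              have := ih r2 (i+2) h2
              simp; omega
        · by_cases hq : c = '"'
          · subst hq; rw [pvSkipStr.eq_def]; simp
          · rw [pvSkipStr.eq_def]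
            simp only []
            rw [if_neg hb, if_neg hq]
            have h2 : rest.length ≤ m := Nat.succ_le_succ_iff.mp hl
            have := ih rest (i+1) h2
            simp; omega

theorem pvSkipStr_len (l : List Char) (i : Nat) : (pvSkipStr l i).1.length ≤ l.length :=
  pvSkipStr_len_aux l.length l i le_rfl

-- outer while loop: only depth, handing strings off to pvSkipStr.
def pvGoB : List Char → Nat → Int → Int
  | [], _, _ => -1
  | c :: rest, i, depth =>
    if c = '"' then
      let p := pvSkipStr rest (i + 1)
      pvGoB p.1 p.2 depth
    else if c = '{' then pvGoB rest (i+1) (depth + 1)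
    else if c = '}' ∧ depth > 0 then
      if depth - 1 = 0 then ((i : Int) + 1)
      else pvGoB rest (i+1) (depth - 1)
    else pvGoB rest (i+1) depth
termination_by l _ _ => l.length
decreasing_by
  · exact Nat.lt_succ_of_le (pvSkipStr_len rest (i+1))
  · simp
  · simp
  · simp

def find_first_object_end_py_alt (text : String) : Int :=
  pvGoB text.toList 0 0

-- ===== PRECONDITION & SPEC =====
def Spec_find_first_object_end_py (text : String) (out : Int) : Prop := out = find_first_object_end_py_alt text
instance (text : String) (out : Int) : Decidable (Spec_find_first_object_end_py text out) := by unfold Spec_find_first_object_end_py; infer_instance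

-- ===== CLAIM (what is proved, stated in full; the proofs are below) =====
def Claim_equal_find_first_object_end_py : Prop := ∀ (text : String), Dom_find_first_object_end_py text → Spec_find_first_object_end_py text (find_first_object_end_py text)

-- ===== LEMMAS AND PROOFS =====

-- skipping a string literal: A's flag-driven steps equal B's helper.
theorem pvSkip_corr_aux : ∀ (n : Nat) (l : List Char) (i : Nat) (depth : Int) (started : Bool),
    l.length ≤ n →
    pvGoA l i depth true false started
      = pvGoA (pvSkipStr l i).1 (pvSkipStr l i).2 depth false false started := by
  intro n
  induction n with
  | zero =>
      intro l i d st hl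
      have : l = [] := List.eq_nil_of_length_eq_zero (Nat.le_zero.mp hl)
      subst this; simp [pvSkipStr, pvGoA]
  | succ m ih =>
      intro l i d st hl
      cases l with
      | nil => simp [pvSkipStr, pvGoA]
      | cons c rest =>
        by_cases hb : c = '\\'
        · subst hb
          cases rest with
          | nil => simp [pvSkipStr, pvGoA]
          | cons x r2 =>
              simp only [pvSkipStr, pvGoA]
              norm_num
              have h2 : r2.length ≤ m := by simp at hl; omega
              exact ih r2 (i+2) d st h2
        · by_cases hq : c = '"'
          · subst hq; rw [pvSkipStr.eq_def]; simp [pvGoA]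
          · rw [pvSkipStr.eq_def]
            simp only [pvGoA]
            norm_num [hb, hq]
            have h2 : rest.length ≤ m := Nat.succ_le_succ_iff.mp hl
            exact ih rest (i+1) d st h2

theorem pvSkip_corr (l : List Char) (i : Nat) (depth : Int) (started : Bool) :
    pvGoA l i depth true false started
      = pvGoA (pvSkipStr l i).1 (pvSkipStr l i).2 depth false false started :=
  pvSkip_corr_aux l.length l i depth started le_rfl

theorem pvMain : ∀ (n : Nat) (l : List Char), l.length ≤ n → ∀ (i : Nat) (depth : Int) (started : Bool),
    0 ≤ depth → (0 < depth → started = true) →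
    pvGoA l i depth false false started = pvGoB l i depth := by
  intro n
  induction n with
  | zero =>
      intro l hl i d s _ _
      have : l = [] := List.eq_nil_of_length_eq_zero (Nat.le_zero.mp hl)
      subst this; simp [pvGoA, pvGoB]
  | succ m ih =>
      intro l hl i d s hd hs
      cases l with
      | nil => simp [pvGoA, pvGoB]
      | cons c rest =>
        have hlen : rest.length ≤ m := Nat.succ_le_succ_iff.mp hl
        by_cases hq : c = '"'
        · subst hq
          simp only [pvGoA, pvGoB]
          norm_num
          rw [pvSkip_corr]
          exact ih _ (le_trans (pvSkipStr_len rest (i+1)) hlen) _ d s hd hs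
        · by_cases ho : c = '{'
          · subst ho
            simp only [pvGoA, pvGoB]
            norm_num
            exact ih _ hlen _ (d+1) true (by omega) (fun _ => rfl)
          · by_cases hc : c = '}'
            · subst hc
              by_cases hdp : d > 0
              · have hst : s = true := hs hdp
                subst hst
                by_cases hz : d - 1 = 0
                · simp [pvGoA, pvGoB, hdp, hz]
                · simp only [pvGoA, pvGoB]
                  norm_num [hdp, hz]
                  exact ih _ hlen _ (d-1) true (by omega) (fun _ => rfl)
              · simp only [pvGoA, pvGoB]
                norm_num [hdp]
                exact ih _ hlen _ d s hd hs
            · simp only [pvGoA, pvGoB]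
              rw [if_neg (by simp : ¬(false = true)), if_neg hq, if_neg ho, if_neg hc,
                  if_neg hq, if_neg ho, if_neg (by simp [hc] : ¬(c = '}' ∧ d > 0))]
              exact ih _ hlen _ d s hd hs

-- ===== VERDICT (by name: the statement is the Claim_ definition above) =====
theorem find_first_object_end_py_spec : Claim_equal_find_first_object_end_py := by
  intro text _
  unfold Spec_find_first_object_end_py find_first_object_end_py find_first_object_end_py_alt
  exact pvMain text.toList.length text.toList (le_refl _) 0 0 false (le_refl _) (by omega)
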